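-- pv_equiv track=rewrite | github.com/elitely/sublimeless_zk | src/settings.py | get_real_error_lineno
-- ===== SOURCE A (Python) =====
-- def get_real_error_lineno(txt, lineno):
--     logical_line_no = 1
--     if lineno == 1:
--         return 1
--     line_index = 0   # just to be safe against the invariant
--     for line_index, line in enumerate(txt.split('\n')):
--         if line.strip().startswith('//'):
--             continue
--         logical_line_no += 1
--         if logical_line_no == lineno:
--             break
--     return line_index + 1
-- ===== SOURCE B (Python) =====
-- def get_real_error_lineno(txt, lineno):
--     if lineno == 1:
--         return 1
--     lines = txt.split('\n')
--     reals = [i for i, line in enumerate(lines) if not line.strip().startswith('//')]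
--     k = lineno - 2
--     if 0 <= k < len(reals):
--         return reals[k] + 1
--     return len(lines)
-- ===== Notes on version B (the rewrite author's own statement) =====
-- stated objective: alternative
-- what changed: Replaces the stateful count-with-early-break loop by one precomputed index table of non-comment line positions plus a bounds-checked arithmetic lookup, with the len(lines) fallback.
import Mathlib
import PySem

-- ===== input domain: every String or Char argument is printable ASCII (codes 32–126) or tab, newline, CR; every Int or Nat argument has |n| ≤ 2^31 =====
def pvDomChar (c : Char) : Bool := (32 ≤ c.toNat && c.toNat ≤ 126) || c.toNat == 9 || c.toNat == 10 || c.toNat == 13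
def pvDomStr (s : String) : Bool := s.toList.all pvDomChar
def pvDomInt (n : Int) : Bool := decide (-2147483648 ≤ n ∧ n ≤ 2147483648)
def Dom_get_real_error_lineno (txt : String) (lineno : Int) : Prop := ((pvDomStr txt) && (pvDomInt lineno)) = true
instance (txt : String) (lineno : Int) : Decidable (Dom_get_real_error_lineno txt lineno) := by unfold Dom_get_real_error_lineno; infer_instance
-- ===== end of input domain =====

-- B replaces A's stateful count-with-early-break loop by a precomputed table of
-- non-comment line indices plus a bounds-checked lookup (alternative decomposition, same cost).


-- ===== PORT A =====
-- line.strip().startswith('//')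
def isCommentLine (line : String) : Bool :=
  PySem.Str.startswith (PySem.Str.strip line) "//"

-- the for-loop with `continue`/`break`: state = (logical_line_no, line_index); returns final line_index
def aLoop (lineno : Int) : List (Int × String) → Int → Int → Int
  | [], _, li => li
  | (i, line) :: rest, logical, _ =>
    if isCommentLine line then aLoop lineno rest logical i
    else if logical + 1 = lineno then i
    else aLoop lineno rest (logical + 1) i

def get_real_error_lineno (txt : String) (lineno : Int) : Int :=
  if lineno = 1 then 1
  else
    -- txt.split('\n'): sep is the non-empty literal "\n", so split? is `some`
    let lines := (PySem.Str.split? txt "\n").getD []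
    aLoop lineno (PySem.List.enumerate lines) 1 0 + 1

-- ===== PORT B =====
def get_real_error_lineno_alt (txt : String) (lineno : Int) : Int :=
  if lineno = 1 then 1
  else
    let lines := (PySem.Str.split? txt "\n").getD []
    let reals := ((PySem.List.enumerate lines).filter
        (fun p => ¬ PySem.Str.startswith (PySem.Str.strip p.2) "//")).map (·.1)
    let k := lineno - 2
    if 0 ≤ k ∧ k < (reals.length : Int) then reals.getD k.toNat 0 + 1
    else (lines.length : Int)

-- ===== PRECONDITION & SPEC =====
def Spec_get_real_error_lineno (txt : String) (lineno : Int) (out : Int) : Prop := out = get_real_error_lineno_alt txt lineno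
instance (txt : String) (lineno : Int) (out : Int) : Decidable (Spec_get_real_error_lineno txt lineno out) := by unfold Spec_get_real_error_lineno; infer_instance

-- ===== CLAIM (what is proved, stated in full; the proofs are below) =====
def Claim_equal_get_real_error_lineno : Prop := ∀ (txt : String) (lineno : Int), Dom_get_real_error_lineno txt lineno → Spec_get_real_error_lineno txt lineno (get_real_error_lineno txt lineno)

-- ===== LEMMAS AND PROOFS =====

-- the index table B builds, as a function of the pair list
def realsOf (pairs : List (Int × String)) : List Int :=
  (pairs.filter (fun p => ¬ isCommentLine p.2)).map (·.1)

-- the fallback value of A's loop: index of the last pair (or the initial line_index)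
def lastFst (pairs : List (Int × String)) (li : Int) : Int :=
  match pairs with
  | [] => li
  | p :: rest => lastFst rest p.1

-- characterisation of A's loop via B's table
theorem aLoop_eq (lineno : Int) (pairs : List (Int × String)) (logical li : Int) :
    aLoop lineno pairs logical li =
      if 0 ≤ lineno - logical - 1 ∧ lineno - logical - 1 < ((realsOf pairs).length : Int)
      then (realsOf pairs).getD (lineno - logical - 1).toNat 0
      else lastFst pairs li := by
  induction pairs generalizing logical li with
  | nil =>
    simp only [aLoop, realsOf, List.filter_nil, List.map_nil, List.length_nil, lastFst]
    rw [if_neg (by push_cast; omega)]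
  | cons p rest ih =>
    obtain ⟨i, line⟩ := p
    by_cases hc : isCommentLine line
    · simp only [aLoop, hc, if_true]
      have hreals : realsOf ((i, line) :: rest) = realsOf rest := by
        simp [realsOf, hc]
      rw [ih logical i, hreals]
      rfl
    · by_cases hb : logical + 1 = lineno
      · have hk : lineno - logical - 1 = 0 := by omega
        have hreals : realsOf ((i, line) :: rest) = i :: realsOf rest := by
          simp [realsOf, hc]
        simp only [aLoop, hc, if_false, hb, if_true, Bool.false_eq_true,
          hreals, hk]
        rw [if_pos ?_]
        · rfl
        · refine ⟨by omega, ?_⟩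
          simp only [List.length_cons]
          positivity
      · simp only [aLoop, hc, hb, Bool.false_eq_true, if_false]
        rw [ih (logical + 1) i]
        have hreals : realsOf ((i, line) :: rest) = i :: realsOf rest := by
          simp [realsOf, hc]
        rw [hreals]
        have e : lineno - (logical + 1) - 1 = lineno - logical - 2 := by ring
        rw [e]
        by_cases hpos : 0 ≤ lineno - logical - 2 ∧
            lineno - logical - 2 < ((realsOf rest).length : Int)
        · rw [if_pos hpos,
            if_pos (show 0 ≤ lineno - logical - 1 ∧
              lineno - logical - 1 < ((i :: realsOf rest).length : Int) by
                simp only [List.length_cons]; push_cast; omega)]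
          have ht : (lineno - logical - 1).toNat = (lineno - logical - 2).toNat + 1 := by omega
          simp [ht]
        · rw [if_neg hpos, if_neg ?_]
          · simp [lastFst]
          · simp only [List.length_cons]
            push_cast
            intro h
            exact hpos ⟨by omega, by omega⟩

-- the last index of an enumeration starting at s of a list of length n is s + n - 1
theorem lastFst_enumerate (xs : List String) (s li : Int) :
    lastFst (PySem.List.enumerate xs s) li =
      if xs.isEmpty then li else s + (xs.length : Int) - 1 := by
  induction xs generalizing s li with
  | nil => simp [PySem.List.enumerate_nil, lastFst]
  | cons x rest ih =>
    rw [PySem.List.enumerate_cons]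
    simp only [lastFst, ih (s + 1) s]
    by_cases h : rest.isEmpty
    · have : rest = [] := List.isEmpty_iff.mp h
      simp [this]
    · simp only [h, if_false, List.isEmpty_cons, Bool.false_eq_true,
        List.length_cons]
      push_cast
      ring

-- splitOn's worker always returns at least one piece
theorem splitOn_go_ne_nil (sep : List Char) :
    ∀ (fuel : Nat) (l cur : List Char) (acc : List (List Char)),
      PySem.Chars.splitOn.go sep fuel l cur acc ≠ [] := by
  intro fuel
  induction fuel with
  | zero =>
    intro l cur acc
    simp [PySem.Chars.splitOn.go]
  | succ n ih =>
    intro l cur acc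
    cases l with
    | nil => simp [PySem.Chars.splitOn.go]
    | cons c rest =>
      rw [PySem.Chars.splitOn.go]
      split
      · exact ih _ _ _
      · exact ih _ _ _

-- Python's str.split always yields at least one piece
theorem split_lines_ne_nil (txt : String) : (PySem.Str.split? txt "\n").getD [] ≠ [] := by
  have h := PySem.Str.split?_map txt "\n"
  rw [show PySem.Chars.split? txt.toList "\n".toList =
      some (PySem.Chars.splitOn txt.toList "\n".toList) by
    simp [PySem.Chars.split?]] at h
  cases hs : PySem.Str.split? txt "\n" with
  | none => rw [hs] at h; simp at h
  | some ls =>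
    rw [hs] at h
    simp only [Option.map_some, Option.some.injEq] at h
    have hne : PySem.Chars.splitOn txt.toList "\n".toList ≠ [] := by
      unfold PySem.Chars.splitOn
      exact splitOn_go_ne_nil _ _ _ _ _
    intro hnil
    simp only [Option.getD_some] at hnil
    rw [hnil] at h
    exact hne h.symm

-- ===== VERDICT (by name: the statement is the Claim_ definition above) =====
theorem get_real_error_lineno_spec : Claim_equal_get_real_error_lineno := by
  intro txt lineno _
  unfold Spec_get_real_error_lineno get_real_error_lineno get_real_error_lineno_alt
  by_cases h1 : lineno = 1
  · simp [h1]
  · simp only [h1, if_false]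
    rw [aLoop_eq]
    have hr : realsOf (PySem.List.enumerate ((PySem.Str.split? txt "\n").getD []) 0) =
        ((PySem.List.enumerate ((PySem.Str.split? txt "\n").getD [])).filter
          (fun p => ¬ PySem.Str.startswith (PySem.Str.strip p.2) "//")).map (·.1) := by
      rfl
    have hk : lineno - 1 - 1 = lineno - 2 := by ring
    rw [hr, hk]
    split
    · rfl
    · rw [lastFst_enumerate]
      have : ((PySem.Str.split? txt "\n").getD []).isEmpty = false := by
        simp [split_lines_ne_nil]
      simp only [this, Bool.false_eq_true, if_false]
      ring
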